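-- pv_equiv track=rewrite | github.com/vinija/AI-Coding | LocalMinima.py | find_local_minima
-- ===== SOURCE A (Python) =====
-- def find_local_minima(arr):
--     """
--     Find the index of a local minima in the given array. A local minima is defined as an element
--     which is smaller than its neighbors. For edge elements, only one neighbor is considered.
--
--     Args:
--     arr (list[int]): The input array.
--
--     Returns:
--     int: The index of a local minima in the array.
--     """
--     n = len(arr)
--     start, end = 0, n - 1
--
--     # Edge cases for the first and last element
--     if n == 1 or arr[0] < arr[1]:
--         return 0
--     if arr[n - 1] < arr[n - 2]:
--         return n - 1
--
--     # Binary search for the local minima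
--     while start <= end:
--         mid = (start + end) // 2
--
--         # Check if the middle element is less than its neighbors
--         if arr[mid] < arr[mid - 1] and arr[mid] < arr[mid + 1]:
--             return mid
--         # If the left neighbor is smaller, move to the left half
--         elif arr[mid - 1] < arr[mid]:
--             end = mid - 1
--         # If the right neighbor is smaller, move to the right half
--         else:
--             start = mid + 1
--
--     # Fallback in case no local minima is found (should not happen in a well-formed input)
--     return -1
-- ===== SOURCE B (Python) =====
-- def _search(arr, lo, k):
--     """Binary search over the interval of length k starting at lo (recursion on the length)."""
--     if k == 0:
--         return -1
--     half = (k - 1) // 2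
--     mid = lo + half
--     if arr[mid - 1] < arr[mid]:
--         return _search(arr, lo, half)
--     if arr[mid] < arr[mid - 1] and arr[mid] < arr[mid + 1]:
--         return mid
--     return _search(arr, mid + 1, k - 1 - half)
--
--
-- def find_local_minima(arr):
--     """Same result as A: recursion on the interval LENGTH instead of the (start, end) loop."""
--     n = len(arr)
--     if n == 1 or arr[0] < arr[1]:
--         return 0
--     if arr[-1] < arr[-2]:
--         return n - 1
--     return _search(arr, 0, n)
-- ===== Notes on version B (the rewrite author's own statement) =====
-- stated objective: alternative
-- what changed: The while loop over mutable (start, end) becomes a recursive helper over (lo, length) with the local-minimum test reordered after the go-left test and the interval tracked by its length, and the last-element guard uses negative indexing.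
import Mathlib
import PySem

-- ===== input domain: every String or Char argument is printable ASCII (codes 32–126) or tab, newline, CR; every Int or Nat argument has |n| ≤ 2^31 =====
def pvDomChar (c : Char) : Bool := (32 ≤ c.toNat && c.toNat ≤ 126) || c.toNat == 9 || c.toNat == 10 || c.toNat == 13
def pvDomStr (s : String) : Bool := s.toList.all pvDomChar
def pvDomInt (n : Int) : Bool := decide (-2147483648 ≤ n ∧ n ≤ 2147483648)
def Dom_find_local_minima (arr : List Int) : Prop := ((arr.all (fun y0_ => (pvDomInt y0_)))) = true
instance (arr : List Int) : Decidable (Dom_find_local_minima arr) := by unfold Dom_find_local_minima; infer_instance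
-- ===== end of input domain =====

-- B replaces the while loop over mutable (start, end) by a recursive helper over (lo, length),
-- with the branch order changed and the last-element guard via negative indexing; same values.

-- ===== PORT A =====
-- arr[i] with Python negative-index wraparound; the default 0 is never the value of an access
-- A actually performs on a nonempty list.
def pvGet (arr : List Int) (i : Int) : Int := (PySem.List.pyGet? arr i).getD 0

-- mid = (start + end) // 2
def pyMid (lo hi : Int) : Int := PySem.Int.floordiv (lo + hi) 2

theorem pyMid_bounds {lo hi : Int} (h : lo ≤ hi) : lo ≤ pyMid lo hi ∧ pyMid lo hi ≤ hi :=
  PySem.Int.floordiv_two_mid_bounds h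

-- the `while start <= end` loop, as a tail recursion over the state (start, end)
def findLoopA (arr : List Int) (start e : Int) : Int :=
  if h : start ≤ e then
    if pvGet arr (pyMid start e) < pvGet arr (pyMid start e - 1) ∧
        pvGet arr (pyMid start e) < pvGet arr (pyMid start e + 1) then pyMid start e
    else if pvGet arr (pyMid start e - 1) < pvGet arr (pyMid start e) then
      findLoopA arr start (pyMid start e - 1)
    else findLoopA arr (pyMid start e + 1) e
  else -1
termination_by (e + 1 - start).toNat
decreasing_by all_goals (have hb := pyMid_bounds h; omega)

def find_local_minima (arr : List Int) : Int :=
  let n : Int := arr.length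
  if n = 1 ∨ pvGet arr 0 < pvGet arr 1 then 0
  else if pvGet arr (n - 1) < pvGet arr (n - 2) then n - 1
  else findLoopA arr 0 (n - 1)

-- ===== PORT B =====
-- _search(arr, lo, k): recursion on the interval LENGTH k (a Nat); -1 on the empty interval
def searchAlt (arr : List Int) (lo : Int) (k : Nat) : Int :=
  match k with
  | 0 => -1
  | Nat.succ k' =>
    let half : Nat := k' / 2
    let mid : Int := lo + (half : Int)
    if pvGet arr (mid - 1) < pvGet arr mid then searchAlt arr lo half
    else if pvGet arr mid < pvGet arr (mid - 1) ∧ pvGet arr mid < pvGet arr (mid + 1) then mid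
    else searchAlt arr (mid + 1) (k' - half)
termination_by k
decreasing_by all_goals omega

def find_local_minima_alt (arr : List Int) : Int :=
  let n : Nat := arr.length
  if n = 1 ∨ pvGet arr 0 < pvGet arr 1 then 0
  else if pvGet arr (-1) < pvGet arr (-2) then (n : Int) - 1
  else searchAlt arr 0 n

-- ===== PRECONDITION & SPEC =====
-- Pre_ excludes only the empty list, on which A raises IndexError (arr[0]).
def Pre_find_local_minima (arr : List Int) : Prop := arr ≠ []
instance (arr : List Int) : Decidable (Pre_find_local_minima arr) := by
  unfold Pre_find_local_minima; infer_instance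
def pvWitness_find_local_minima : List Int := [2, 1, 3]

def Spec_find_local_minima (arr : List Int) (out : Int) : Prop := out = find_local_minima_alt arr
instance (arr : List Int) (out : Int) : Decidable (Spec_find_local_minima arr out) := by
  unfold Spec_find_local_minima; infer_instance

-- ===== CLAIM =====
def Claim_equal_find_local_minima : Prop := ∀ (arr : List Int), Dom_find_local_minima arr → Pre_find_local_minima arr → Spec_find_local_minima arr (find_local_minima arr)

-- ===== LEMMAS AND PROOFS =====

theorem mid_eq {s e : Int} (h : s ≤ e) :
    pyMid s e = s + (((e - s).toNat / 2 : Nat) : Int) := by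
  unfold pyMid
  rw [PySem.Int.floordiv_eq_ediv_of_pos (by omega)]
  omega

-- the loop over (start, end) and the recursion over (lo, length) satisfy the same recurrence
theorem loop_eq_search (arr : List Int) (s e : Int) :
    findLoopA arr s e = searchAlt arr s (e + 1 - s).toNat := by
  fun_induction findLoopA arr s e with
  | case1 s e h hif =>
      have hk : (e + 1 - s).toNat = ((e - s).toNat) + 1 := by omega
      have hm := mid_eq h
      rw [hk]
      simp only [searchAlt]
      rw [if_neg (by rw [← hm]; omega), if_pos (by rw [← hm]; exact hif), ← hm]
  | case2 s e h hif hl ih =>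
      have hk : (e + 1 - s).toNat = ((e - s).toNat) + 1 := by omega
      have hm := mid_eq h
      rw [hk]
      simp only [searchAlt]
      rw [if_pos (by rw [← hm]; exact hl), ih]
      congr 1
      omega
  | case3 s e h hif hl ih =>
      have hk : (e + 1 - s).toNat = ((e - s).toNat) + 1 := by omega
      have hm := mid_eq h
      rw [hk]
      simp only [searchAlt]
      rw [if_neg (by rw [← hm]; exact hl), if_neg (by rw [← hm]; exact hif), ih, ← hm]
      congr 1
      omega
  | case4 s e h =>
      have hk : (e + 1 - s).toNat = 0 := by omega
      rw [hk, searchAlt]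

-- the two last-element guards read the same cells on a list of length ≥ 2
theorem pvGet_neg_one (arr : List Int) (h : 2 ≤ arr.length) :
    pvGet arr (-1) = pvGet arr ((arr.length : Int) - 1) := by
  unfold pvGet
  rw [PySem.List.pyGet?_neg_ofNat arr 1 (by omega) (by omega),
      show ((arr.length : Int) - 1) = ((arr.length - 1 : Nat) : Int) by omega,
      PySem.List.pyGet?_natCast]

theorem pvGet_neg_two (arr : List Int) (h : 2 ≤ arr.length) :
    pvGet arr (-2) = pvGet arr ((arr.length : Int) - 2) := by
  unfold pvGet
  rw [PySem.List.pyGet?_neg_ofNat arr 2 (by omega) (by omega),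
      show ((arr.length : Int) - 2) = ((arr.length - 2 : Nat) : Int) by omega,
      PySem.List.pyGet?_natCast]

-- ===== VERDICT =====
theorem find_local_minima_spec : Claim_equal_find_local_minima := by
  intro arr _ hne
  have hlen : 1 ≤ arr.length := by
    cases arr with
    | nil => exact absurd rfl hne
    | cons a t => simp
  have hcast : ((arr.length : Int) = 1) ↔ (arr.length = 1) := by omega
  unfold Spec_find_local_minima find_local_minima find_local_minima_alt
  simp only [hcast]
  by_cases h1 : arr.length = 1 ∨ pvGet arr 0 < pvGet arr 1
  · rw [if_pos h1, if_pos h1]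
  · have h2 : 2 ≤ arr.length := by
      rcases Nat.lt_or_ge arr.length 2 with h | h
      · exact absurd (Or.inl (by omega)) h1
      · exact h
    rw [if_neg h1, if_neg h1, pvGet_neg_one arr h2, pvGet_neg_two arr h2]
    by_cases hg : pvGet arr ((arr.length : Int) - 1) < pvGet arr ((arr.length : Int) - 2)
    · rw [if_pos hg, if_pos hg]
    · rw [if_neg hg, if_neg hg, loop_eq_search]
      congr 1
      omega
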